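-- pv_equiv track=rewrite | github.com/sam-dumont/immich-video-memory-generator | src/immich_memories/analysis/duplicates.py | _union_find_groups
-- ===== SOURCE A (Python) =====
-- def _union_find_groups(items: list[str], pairs: list[tuple[str, str]]) -> list[list[str]]:
--     """Group items using union-find based on pairs.
--
--     Args:
--         items: List of item IDs.
--         pairs: List of (id1, id2) pairs that should be grouped together.
--
--     Returns:
--         List of groups, where each group is a list of IDs.
--     """
--     parent: dict[str, str] = {item: item for item in items}
--
--     def find(x: str) -> str:
--         if parent[x] != x:
--             parent[x] = find(parent[x])
--         return parent[x]
--
--     def union(x: str, y: str) -> None: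
--         px, py = find(x), find(y)
--         if px != py:
--             parent[px] = py
--
--     # Union paired items
--     for id1, id2 in pairs:
--         union(id1, id2)
--
--     # Group by root
--     groups: dict[str, list[str]] = {}
--     for item in items:
--         root = find(item)
--         if root not in groups:
--             groups[root] = []
--         groups[root].append(item)
--
--     return list(groups.values())
-- ===== SOURCE B (Python) =====
-- def _union_find_groups(items: list[str], pairs: list[tuple[str, str]]) -> list[list[str]]:
--     """Group items by merging: keep a flat item->representative map and, for each
--     pair, relabel the whole class of one representative to the other (no trees,
--     no recursion, no path compression)."""
--     root = {item: item for item in items}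
--     for id1, id2 in pairs:
--         r1, r2 = root[id1], root[id2]
--         if r1 != r2:
--             root = {k: (r2 if v == r1 else v) for k, v in root.items()}
--     groups: dict[str, list[str]] = {}
--     for item in items:
--         r = root[item]
--         if r not in groups:
--             groups[r] = []
--         groups[r].append(item)
--     return list(groups.values())
-- ===== Notes on version B (the rewrite author's own statement) =====
-- stated objective: simpler
-- what changed: Replaces the recursive union-find forest with path compression by a flat item-to-representative map that is eagerly relabelled on each merging pair, removing the recursive find entirely.
import Mathlib
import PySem

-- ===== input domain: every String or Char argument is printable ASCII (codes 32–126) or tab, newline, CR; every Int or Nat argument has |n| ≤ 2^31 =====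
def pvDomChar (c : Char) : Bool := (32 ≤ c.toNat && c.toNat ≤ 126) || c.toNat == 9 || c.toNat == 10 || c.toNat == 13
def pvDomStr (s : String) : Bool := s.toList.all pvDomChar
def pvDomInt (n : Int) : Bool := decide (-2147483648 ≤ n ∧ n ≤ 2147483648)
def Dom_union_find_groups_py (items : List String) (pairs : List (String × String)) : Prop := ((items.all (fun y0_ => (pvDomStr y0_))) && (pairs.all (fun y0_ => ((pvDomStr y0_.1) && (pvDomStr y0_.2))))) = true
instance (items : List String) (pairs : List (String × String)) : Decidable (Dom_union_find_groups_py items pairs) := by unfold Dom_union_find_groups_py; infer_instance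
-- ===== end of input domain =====

-- B replaces A's recursive path-compressing union-find forest by a flat
-- item-to-representative map relabelled eagerly at each merging pair (simpler: no recursion).


-- ===== PORT A =====
-- Python's recursive `find` with path compression; the Nat argument is only a
-- totality guard (Python has no fuel): 2^pairs.length + 1 always exceeds the
-- length of any parent chain (proved via the measure in the lemmas below).
def pvFindA (fuel : Nat) (par : PySem.Dict String String) (x : String) :
    PySem.Dict String String × String :=
  match fuel with
  | 0 => (par, x)
  | f + 1 =>
    match par.get? x with
    | none => (par, x)  -- Python raises KeyError here; excluded by Pre_
    | some p =>
      if p = x then (par, p)                      -- parent[x] == x: return parent[x]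
      else
        let pr := pvFindA f par p                 -- parent[x] = find(parent[x])
        (pr.1.insert x pr.2, pr.2)                -- return parent[x]

-- Python's `union`
def pvUnionA (fuel : Nat) (par : PySem.Dict String String) (x y : String) :
    PySem.Dict String String :=
  let f1 := pvFindA fuel par x
  let f2 := pvFindA fuel f1.1 y
  if f1.2 = f2.2 then f2.1 else f2.1.insert f1.2 f2.2   -- if px != py: parent[px] = py

def union_find_groups_py (items : List String) (pairs : List (String × String)) :
    List (List String) :=
  let fuel := 2 ^ pairs.length + 1
  let par0 := items.foldl (fun d it => d.insert it it) PySem.Dict.empty  -- {item: item for item in items}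
  let par1 := pairs.foldl (fun par pr => pvUnionA fuel par pr.1 pr.2) par0
  let st := items.foldl
    (fun (st : PySem.Dict String String × PySem.Dict String (List String)) it =>
      let fr := pvFindA fuel st.1 it              -- root = find(item)
      let g1 := if st.2.contains fr.2 then st.2 else st.2.insert fr.2 []  -- if root not in groups: groups[root] = []
      (fr.1, g1.modify fr.2 [] (fun l => l ++ [it])))                     -- groups[root].append(item)
    (par1, PySem.Dict.empty)
  st.2.values

-- ===== PORT B =====
-- {k: (r2 if v == r1 else v) for k, v in root.items()} — keys of a dict are
-- unique and keep their order, so mapping the items list is exact.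
def pvRelabel (R : PySem.Dict String String) (r1 r2 : String) : PySem.Dict String String :=
  PySem.Dict.mk (R.items.map (fun kv => (kv.1, if kv.2 = r1 then r2 else kv.2)))

def union_find_groups_py_alt (items : List String) (pairs : List (String × String)) :
    List (List String) :=
  let R0 := items.foldl (fun d it => d.insert it it) PySem.Dict.empty
  let R := pairs.foldl
    (fun R pr =>
      match R.get? pr.1, R.get? pr.2 with
      | some r1, some r2 => if r1 = r2 then R else pvRelabel R r1 r2
      | _, _ => R)        -- Python raises KeyError here; excluded by Pre_
    R0
  let groups := items.foldl
    (fun (g : PySem.Dict String (List String)) it =>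
      let r := R.getD it it   -- root[item]; every item is a key of root
      let g1 := if g.contains r then g else g.insert r []
      g1.modify r [] (fun l => l ++ [it]))
    PySem.Dict.empty
  groups.values

-- ===== PRECONDITION & SPEC =====
-- Pre_ excludes exactly the inputs on which Python A raises KeyError: a pair
-- mentioning an id that is not in items (B raises there too).
def Pre_union_find_groups_py (items : List String) (pairs : List (String × String)) : Prop :=
  ∀ p ∈ pairs, p.1 ∈ items ∧ p.2 ∈ items
instance (items : List String) (pairs : List (String × String)) : Decidable (Pre_union_find_groups_py items pairs) := by unfold Pre_union_find_groups_py; infer_instance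

def pvWitness_union_find_groups_py : List String × (List (String × String)) :=
  (["a", "b", "c", "d"], [("a", "b"), ("c", "b")])

def Spec_union_find_groups_py (items : List String) (pairs : List (String × String)) (out : List (List String)) : Prop := out = union_find_groups_py_alt items pairs
instance (items : List String) (pairs : List (String × String)) (out : List (List String)) : Decidable (Spec_union_find_groups_py items pairs out) := by unfold Spec_union_find_groups_py; infer_instance

-- ===== CLAIM (what is proved, stated in full; the proofs are below) =====
def Claim_equal_union_find_groups_py : Prop := ∀ (items : List String) (pairs : List (String × String)), Dom_union_find_groups_py items pairs → Pre_union_find_groups_py items pairs → Spec_union_find_groups_py items pairs (union_find_groups_py items pairs)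

-- ===== LEMMAS AND PROOFS =====

-- Invariant tying A's parent forest `par` to B's flat map `R`: same key set,
-- parent edges stay inside one B-class, B-representatives are A-roots and the
-- only A-fixpoints, and the measure `h` strictly decreases along real edges.
def pvInv (R : PySem.Dict String String) (h : String → Nat)
    (par : PySem.Dict String String) : Prop :=
  (∀ x, (par.get? x).isSome ↔ (R.get? x).isSome) ∧
  (∀ x p, par.get? x = some p → R.get? p = R.get? x) ∧
  (∀ x r, R.get? x = some r → par.get? r = some r ∧ R.get? r = some r) ∧
  (∀ x, par.get? x = some x → R.get? x = some x) ∧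
  (∀ x p, par.get? x = some p → p ≠ x → h p < h x)

theorem pvGet?_relabel (R : PySem.Dict String String) (r1 r2 x : String) :
    (pvRelabel R r1 r2).get? x = (R.get? x).map (fun v => if v = r1 then r2 else v) := by
  obtain ⟨l⟩ := R
  induction l with
  | nil => rfl
  | cons kv rest ih =>
    obtain ⟨k, v⟩ := kv
    simp only [pvRelabel, List.map_cons, PySem.Dict.get?_mk_cons] at *
    split_ifs <;> simp_all [pvRelabel]

theorem pvInit_get? (l : List String) (d : PySem.Dict String String) (x : String) :
    (l.foldl (fun d it => d.insert it it) d).get? x =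
      if x ∈ l then some x else d.get? x := by
  induction l generalizing d with
  | nil => simp
  | cons a l ih =>
    simp only [List.foldl_cons, ih, List.mem_cons, PySem.Dict.get?_insert]
    by_cases hx : x = a <;> by_cases hm : x ∈ l <;> simp [hx, hm]

theorem pvFindA_spec (R : PySem.Dict String String) (h : String → Nat) :
    ∀ (f : Nat) (par : PySem.Dict String String) (x rx : String),
      pvInv R h par → R.get? x = some rx → h x < f →
      (pvFindA f par x).2 = rx ∧ h rx ≤ h x ∧ pvInv R h (pvFindA f par x).1 := by
  intro f
  induction f with
  | zero => intro par x rx _ _ hf; omega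
  | succ f ih =>
    intro par x rx hinv hx hf
    obtain ⟨K, C, T, S, D⟩ := hinv
    have hxs : (par.get? x).isSome := (K x).2 (by simp [hx])
    obtain ⟨p, hp⟩ := Option.isSome_iff_exists.mp hxs
    by_cases hpx : p = x
    · -- root reached
      have hpar : par.get? x = some x := by rw [hp, hpx]
      have hx' : R.get? x = some x := S _ hpar
      have hrx : rx = x := by rw [hx] at hx'; exact Option.some.inj hx'
      refine ⟨?_, le_of_eq (by rw [hrx]), ?_⟩
      · simp [pvFindA, hp, hpx, hrx]
      · have : (pvFindA (f+1) par x).1 = par := by simp [pvFindA, hp, hpx]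
        rw [this]; exact ⟨K, C, T, S, D⟩
    · -- recurse on p
      have hRp : R.get? p = some rx := by rw [C _ _ hp, hx]
      have hhp : h p < h x := D _ _ hp hpx
      obtain ⟨ih1, ih2, ihinv⟩ := ih par p rx ⟨K, C, T, S, D⟩ hRp (by omega)
      obtain ⟨K1, C1, T1, S1, D1⟩ := ihinv
      have hroot := T1 _ _ hRp
      constructor
      · simp [pvFindA, hp, hpx, ih1]
      constructor
      · omega
      · -- invariant for (pvFindA f par p).1.insert x rx
        have hres : (pvFindA (f+1) par x).1 = ((pvFindA f par p).1.insert x rx) := by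
          simp [pvFindA, hp, hpx, ih1]
        rw [hres]
        refine ⟨?_, ?_, ?_, ?_, ?_⟩
        · intro z
          rw [PySem.Dict.get?_insert]
          by_cases hz : z = x
          · subst hz; simp [hx]
          · simp [hz, K1 z]
        · intro z v hv
          rw [PySem.Dict.get?_insert] at hv
          by_cases hz : z = x
          · subst hz; simp at hv
            rw [← hv, hroot.2, hx]
          · simp [hz] at hv; exact C1 _ _ hv
        · intro z r hr
          have hTz := T1 _ _ hr
          refine ⟨?_, hTz.2⟩
          rw [PySem.Dict.get?_insert]
          by_cases hrx2 : r = x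
          · have hrxx : rx = x := by
              rw [hrx2] at hTz
              rw [hTz.2] at hx
              exact (Option.some.inj hx).symm
            rw [if_pos hrx2, hrxx, hrx2]
          · rw [if_neg hrx2]; exact hTz.1
        · intro z hz
          rw [PySem.Dict.get?_insert] at hz
          by_cases hzx : z = x
          · subst hzx; simp at hz
            rw [← hz] at hx ⊢; exact hx
          · simp [hzx] at hz; exact S1 _ hz
        · intro z v hv hne
          rw [PySem.Dict.get?_insert] at hv
          by_cases hz : z = x
          · subst hz; simp at hv; subst hv; omega
          · simp [hz] at hv; exact D1 _ _ hv hne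

theorem pvUnionA_spec (R : PySem.Dict String String) (h : String → Nat) (n fuel : Nat)
    (par : PySem.Dict String String) (a b ra rb : String)
    (hinv : pvInv R h par) (hb : ∀ x, (R.get? x).isSome → h x < n)
    (ha' : R.get? a = some ra) (hb' : R.get? b = some rb) (hn : n ≤ fuel) :
    ∃ h', pvInv (if ra = rb then R else pvRelabel R ra rb) h'
            (pvUnionA fuel par a b) ∧
          (∀ x, ((if ra = rb then R else pvRelabel R ra rb).get? x).isSome → h' x < 2 * n) := by
  obtain ⟨e1, -, inv1⟩ := pvFindA_spec R h fuel par a ra hinv ha'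
    (lt_of_lt_of_le (hb a (by simp [ha'])) hn)
  obtain ⟨e2, -, inv2⟩ := pvFindA_spec R h fuel (pvFindA fuel par a).1 b rb inv1 hb'
    (lt_of_lt_of_le (hb b (by simp [hb'])) hn)
  set par2 := (pvFindA fuel (pvFindA fuel par a).1 b).1 with hpar2
  have hU : pvUnionA fuel par a b = if ra = rb then par2 else par2.insert ra rb := by
    simp only [pvUnionA, e1, e2, hpar2]
  obtain ⟨K2, C2, T2, S2, D2⟩ := inv2
  by_cases hr : ra = rb
  · refine ⟨h, ?_, ?_⟩
    · simp only [hU, if_pos hr]; exact ⟨K2, C2, T2, S2, D2⟩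
    · intro x hx; rw [if_pos hr] at hx; have := hb x hx; omega
  · -- merge: relabel ra → rb
    have hRra : R.get? ra = some ra := (T2 _ _ ha').2
    have hRrb : R.get? rb = some rb := (T2 _ _ hb').2
    have hpra : par2.get? ra = some ra := (T2 _ _ ha').1
    have hprb : par2.get? rb = some rb := (T2 _ _ hb').1
    refine ⟨fun z => if R.get? z = some ra then h z + n else h z, ?_, ?_⟩
    · simp only [hU, if_neg hr]
      refine ⟨?_, ?_, ?_, ?_, ?_⟩
      · intro z
        rw [PySem.Dict.get?_insert, pvGet?_relabel]
        by_cases hz : z = ra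
        · subst hz; simp [hRra]
        · simp [hz, K2 z]
      · intro z v hv
        rw [PySem.Dict.get?_insert] at hv
        rw [pvGet?_relabel, pvGet?_relabel]
        by_cases hz : z = ra
        · subst hz; simp at hv; subst hv
          simp [hRra, hRrb, hr, Ne.symm hr]
        · simp [hz] at hv
          rw [C2 _ _ hv]
      · intro z r hr'
        rw [pvGet?_relabel] at hr'
        obtain ⟨r0, hr0, hsub⟩ := Option.map_eq_some_iff.mp hr'
        by_cases h0 : r0 = ra
        · subst h0; simp at hsub; subst hsub
          constructor
          · rw [PySem.Dict.get?_insert, if_neg (Ne.symm hr)]; exact hprb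
          · rw [pvGet?_relabel, hRrb]; simp [Ne.symm hr]
        · simp [h0] at hsub; subst hsub
          have := T2 _ _ hr0
          constructor
          · rw [PySem.Dict.get?_insert, if_neg h0]; exact this.1
          · rw [pvGet?_relabel, this.2]; simp [h0]
      · intro z hz
        rw [PySem.Dict.get?_insert] at hz
        by_cases hzr : z = ra
        · subst hzr; rw [if_pos rfl] at hz
          exact absurd (Option.some.inj hz) (Ne.symm hr)
        · rw [if_neg hzr] at hz
          rw [pvGet?_relabel, S2 _ hz]; simp [hzr]
      · intro z v hv hne
        rw [PySem.Dict.get?_insert] at hv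
        by_cases hz : z = ra
        · subst hz; simp at hv; subst hv
          have h1 : h rb < n := hb rb (by simp [hRrb])
          simp [hRra, hRrb, hr, Ne.symm hr]
          omega
        · simp [hz] at hv
          have hlt := D2 _ _ hv hne
          have hcl : R.get? v = R.get? z := C2 _ _ hv
          by_cases hc : R.get? z = some ra <;> simp [hc, hcl ▸ hc, hcl, hc] <;> omega
    · intro x hx
      rw [if_neg hr, pvGet?_relabel] at hx
      have : (R.get? x).isSome := by
        cases hRx : R.get? x <;> simp [hRx] at hx ⊢
      have := hb x this
      show (if R.get? x = some ra then h x + n else h x) < 2 * n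
      split_ifs <;> omega

theorem pvFold_spec (fuel : Nat) :
    ∀ (ps : List (String × String)) (R par : PySem.Dict String String)
      (h : String → Nat) (n : Nat),
      pvInv R h par → (∀ x, (R.get? x).isSome → h x < n) →
      (∀ p ∈ ps, (R.get? p.1).isSome ∧ (R.get? p.2).isSome) →
      n * 2 ^ ps.length < fuel →
      ∃ h', pvInv (ps.foldl (fun R pr =>
                match R.get? pr.1, R.get? pr.2 with
                | some r1, some r2 => if r1 = r2 then R else pvRelabel R r1 r2
                | _, _ => R) R)
              h'
              (ps.foldl (fun par pr => pvUnionA fuel par pr.1 pr.2) par) ∧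
            (∀ x, ((ps.foldl (fun R pr =>
                match R.get? pr.1, R.get? pr.2 with
                | some r1, some r2 => if r1 = r2 then R else pvRelabel R r1 r2
                | _, _ => R) R).get? x).isSome → h' x < n * 2 ^ ps.length) ∧
            (∀ x, ((ps.foldl (fun R pr =>
                match R.get? pr.1, R.get? pr.2 with
                | some r1, some r2 => if r1 = r2 then R else pvRelabel R r1 r2
                | _, _ => R) R).get? x).isSome ↔ (R.get? x).isSome) := by
  intro ps
  induction ps with
  | nil =>
    intro R par h n hinv hb _ _
    exact ⟨h, hinv, by simpa using fun x hx => hb x hx, fun x => Iff.rfl⟩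
  | cons p ps ih =>
    intro R par h n hinv hb hmem hfuel
    obtain ⟨h1s, h2s⟩ := hmem p (by simp)
    obtain ⟨ra, hra⟩ := Option.isSome_iff_exists.mp h1s
    obtain ⟨rb, hrb⟩ := Option.isSome_iff_exists.mp h2s
    have hpow : 2 ≤ 2 ^ (p :: ps).length := by
      have : (1:Nat) ≤ ps.length + 1 := by omega
      calc (2:Nat) = 2 ^ 1 := rfl
        _ ≤ 2 ^ (ps.length + 1) := Nat.pow_le_pow_right (by omega) this
        _ = 2 ^ (p :: ps).length := by simp
    have hnfuel : n ≤ fuel := by nlinarith [hfuel, hpow]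
    obtain ⟨h1, inv1, hb1⟩ := pvUnionA_spec R h n fuel par p.1 p.2 ra rb hinv hb hra hrb hnfuel
    have hkey1 : ∀ x, (((if ra = rb then R else pvRelabel R ra rb)).get? x).isSome ↔ (R.get? x).isSome := by
      intro x
      by_cases hc : ra = rb
      · simp [hc]
      · rw [if_neg hc, pvGet?_relabel]
        cases hx : R.get? x <;> simp
    have hstep : (fun R (pr : String × String) =>
                match R.get? pr.1, R.get? pr.2 with
                | some r1, some r2 => if r1 = r2 then R else pvRelabel R r1 r2
                | _, _ => R) R p = (if ra = rb then R else pvRelabel R ra rb) := by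
      simp [hra, hrb]
    obtain ⟨h', ihinv, ihb, ihkey⟩ := ih (if ra = rb then R else pvRelabel R ra rb)
      (pvUnionA fuel par p.1 p.2) h1 (2 * n) inv1 hb1
      (fun q hq => by
        obtain ⟨q1, q2⟩ := hmem q (by simp [hq])
        exact ⟨(hkey1 q.1).mpr q1, (hkey1 q.2).mpr q2⟩)
      (by
        have : 2 * n * 2 ^ ps.length = n * 2 ^ (p :: ps).length := by
          simp [List.length_cons, pow_succ]; ring
        omega)
    refine ⟨h', ?_, ?_, ?_⟩
    · simpa [List.foldl_cons, hstep] using ihinv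
    · intro x hx
      have : 2 * n * 2 ^ ps.length = n * 2 ^ (p :: ps).length := by
        simp [List.length_cons, pow_succ]; ring
      rw [← this]
      apply ihb
      simpa [List.foldl_cons, hstep] using hx
    · intro x
      rw [List.foldl_cons]
      simp only [hra, hrb]
      exact (ihkey x).trans (hkey1 x)

theorem pvGroup_spec (fuel : Nat) (R : PySem.Dict String String) (h : String → Nat)
    (hb : ∀ x, (R.get? x).isSome → h x < fuel) :
    ∀ (its : List String) (par : PySem.Dict String String)
      (groups : PySem.Dict String (List String)),
      pvInv R h par → (∀ it ∈ its, (R.get? it).isSome) →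
      (its.foldl
        (fun (st : PySem.Dict String String × PySem.Dict String (List String)) it =>
          let fr := pvFindA fuel st.1 it
          let g1 := if st.2.contains fr.2 then st.2 else st.2.insert fr.2 []
          (fr.1, g1.modify fr.2 [] (fun l => l ++ [it])))
        (par, groups)).2 =
      its.foldl
        (fun (g : PySem.Dict String (List String)) it =>
          let r := R.getD it it
          let g1 := if g.contains r then g else g.insert r []
          g1.modify r [] (fun l => l ++ [it]))
        groups := by
  intro its
  induction its with
  | nil => intro par groups _ _; rfl
  | cons it its ih =>
    intro par groups hinv hmem
    obtain ⟨r, hr⟩ := Option.isSome_iff_exists.mp (hmem it (by simp))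
    obtain ⟨e, -, inv'⟩ := pvFindA_spec R h fuel par it r hinv hr (hb it (by simp [hr]))
    have hgd : R.getD it it = r := by
      rw [PySem.Dict.getD_eq_get?_getD, hr]; rfl
    simp only [List.foldl_cons, e, hgd]
    exact ih _ _ inv' (fun z hz => hmem z (by simp [hz]))

theorem pv_main (items : List String) (pairs : List (String × String))
    (hpre : Pre_union_find_groups_py items pairs) :
    union_find_groups_py items pairs = union_find_groups_py_alt items pairs := by
  have hinit : ∀ x, (items.foldl (fun d it => d.insert it it) PySem.Dict.empty).get? x
      = if x ∈ items then some x else none := by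
    intro x; rw [pvInit_get?]; simp [PySem.Dict.get?_empty]
  have hinv0 : pvInv (items.foldl (fun d it => d.insert it it) PySem.Dict.empty) (fun _ => 0)
      (items.foldl (fun d it => d.insert it it) PySem.Dict.empty) := by
    refine ⟨fun x => Iff.rfl, ?_, ?_, ?_, ?_⟩
    · intro x p hp
      rw [hinit] at hp
      by_cases hm : x ∈ items
      · rw [if_pos hm] at hp
        obtain rfl := Option.some.inj hp
        rfl
      · rw [if_neg hm] at hp; exact absurd hp (by simp)
    · intro x r hrr
      rw [hinit] at hrr
      by_cases hm : x ∈ items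
      · rw [if_pos hm] at hrr
        obtain rfl := Option.some.inj hrr
        rw [hinit, if_pos hm]; exact ⟨rfl, rfl⟩
      · rw [if_neg hm] at hrr; exact absurd hrr (by simp)
    · intro x hx; exact hx
    · intro x p hp hne
      rw [hinit] at hp
      by_cases hm : x ∈ items
      · rw [if_pos hm] at hp
        obtain rfl := Option.some.inj hp
        exact absurd rfl hne
      · rw [if_neg hm] at hp; exact absurd hp (by simp)
  obtain ⟨h', invF, hbF, hkeyF⟩ := pvFold_spec (2 ^ pairs.length + 1) pairs
    (items.foldl (fun d it => d.insert it it) PySem.Dict.empty)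
    (items.foldl (fun d it => d.insert it it) PySem.Dict.empty)
    (fun _ => 0) 1 hinv0 (fun x _ => Nat.zero_lt_one)
    (fun p hp => by
      obtain ⟨h1, h2⟩ := hpre p hp
      constructor <;> simp [hinit, h1, h2])
    (by simp)
  show (items.foldl _ (_, PySem.Dict.empty)).2.values = _
  refine congrArg PySem.Dict.values ?_
  exact pvGroup_spec (2 ^ pairs.length + 1) _ h'
    (fun x hx => by have := hbF x hx; omega)
    items _ PySem.Dict.empty invF
    (fun z hz => (hkeyF z).mpr (by simp [hinit, hz]))

-- ===== VERDICT (by name: the statement is the Claim_ definition above) =====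
theorem union_find_groups_py_spec : Claim_equal_union_find_groups_py := by
  intro items pairs _ hpre
  exact pv_main items pairs hpre
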